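-- pv_equiv track=rewrite | github.com/pypi-data/pypi-mirror-136 | packages/wgeasywall/wgeasywall-0.1.1-py3-none-any.whl/wgeasywall/utils/graphml/generate.py | findGroupsInNetworkDef
-- ===== SOURCE A (Python) =====
-- def findGroupsInNetworkDef(netDict):
--     groups = []
--     for client in netDict['WGNet']['Clients']:
--       if ('Group' in client):
--         group = client['Group']
--         groups.append(group)
--     groups = list(dict.fromkeys(groups))
--     return groups
-- ===== SOURCE B (Python) =====
-- def findGroupsInNetworkDef(netDict):
--     pending = [c['Group'] for c in netDict['WGNet']['Clients'] if 'Group' in c]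
--     groups = []
--     while pending:
--         g = pending[0]
--         groups.append(g)
--         pending = [x for x in pending[1:] if x != g]
--     return groups
-- ===== Notes on version B (the rewrite author's own statement) =====
-- stated objective: alternative
-- what changed: Dedup by repeated take-first-and-filter: repeatedly emit the head of the pending group list and filter out all its later occurrences, instead of building the full list and deduplicating with dict.fromkeys.
import Mathlib
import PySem

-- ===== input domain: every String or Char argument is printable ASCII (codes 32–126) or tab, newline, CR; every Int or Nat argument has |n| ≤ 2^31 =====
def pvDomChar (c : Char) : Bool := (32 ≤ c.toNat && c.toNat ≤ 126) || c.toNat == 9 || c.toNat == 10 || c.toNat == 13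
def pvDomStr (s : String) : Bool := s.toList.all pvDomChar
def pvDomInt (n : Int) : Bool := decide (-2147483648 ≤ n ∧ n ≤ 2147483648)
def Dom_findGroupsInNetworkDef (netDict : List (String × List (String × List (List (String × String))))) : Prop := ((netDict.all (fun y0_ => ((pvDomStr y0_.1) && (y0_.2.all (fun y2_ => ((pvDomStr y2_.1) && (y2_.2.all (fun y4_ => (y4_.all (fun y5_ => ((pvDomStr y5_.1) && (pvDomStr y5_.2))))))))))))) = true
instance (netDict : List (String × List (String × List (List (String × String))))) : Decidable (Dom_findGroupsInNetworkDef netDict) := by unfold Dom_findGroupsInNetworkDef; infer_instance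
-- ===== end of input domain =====

-- B deduplicates by repeatedly emitting the head of the pending group list and
-- filtering out all of its later occurrences, instead of A's build-then-dict.fromkeys
-- (objective: alternative; not faster).

-- ===== PORT A =====
def findGroupsInNetworkDef (netDict : List (String × List (String × List (List (String × String))))) : List String :=
  let wg := (PySem.Dict.mk netDict).getD "WGNet" []
  let clients := (PySem.Dict.mk wg).getD "Clients" []
  let groups := clients.foldl
    (fun acc client =>
      if (PySem.Dict.mk client).contains "Group" then
        acc ++ [(PySem.Dict.mk client).getD "Group" ""]
      else acc) []
  PySem.List.dedup groups

-- ===== PORT B =====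
-- B's while-loop: take pending[0], append it, filter it out of the tail.
def pvTakeFilterLoop (pending : List String) : List String :=
  match pending with
  | [] => []
  | g :: rest => g :: pvTakeFilterLoop (rest.filter (fun x => x != g))
termination_by pending.length
decreasing_by
  simpa using Nat.lt_succ_of_le (List.length_filter_le _ _)

def findGroupsInNetworkDef_alt (netDict : List (String × List (String × List (List (String × String))))) : List String :=
  let wg := (PySem.Dict.mk netDict).getD "WGNet" []
  let clients := (PySem.Dict.mk wg).getD "Clients" []
  let pending := clients.filterMap (fun c => (PySem.Dict.mk c).get? "Group")
  pvTakeFilterLoop pending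

-- ===== PRECONDITION & SPEC =====
-- Pre_ excludes exactly the inputs on which the Python raises KeyError (the outer or the
-- nested mandatory key is missing); B raises identically there.
def Pre_findGroupsInNetworkDef (netDict : List (String × List (String × List (List (String × String))))) : Prop :=
  (PySem.Dict.mk netDict).contains "WGNet" = true ∧
  (PySem.Dict.mk ((PySem.Dict.mk netDict).getD "WGNet" [])).contains "Clients" = true
instance (netDict : List (String × List (String × List (List (String × String))))) : Decidable (Pre_findGroupsInNetworkDef netDict) := by unfold Pre_findGroupsInNetworkDef; infer_instance

def pvWitness_findGroupsInNetworkDef : (List (String × List (String × List (List (String × String))))) :=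
  [("WGNet", [("Clients", [[("Name", "c1"), ("Group", "g1")], [("Group", "g2")], [("Group", "g1")], [("Name", "c4")]])])]

def Spec_findGroupsInNetworkDef (netDict : List (String × List (String × List (List (String × String))))) (out : List String) : Prop := out = findGroupsInNetworkDef_alt netDict
instance (netDict : List (String × List (String × List (List (String × String))))) (out : List String) : Decidable (Spec_findGroupsInNetworkDef netDict out) := by unfold Spec_findGroupsInNetworkDef; infer_instance

-- ===== CLAIM =====
def Claim_equal_findGroupsInNetworkDef : Prop := ∀ (netDict : List (String × List (String × List (List (String × String))))), Dom_findGroupsInNetworkDef netDict → Pre_findGroupsInNetworkDef netDict → Spec_findGroupsInNetworkDef netDict (findGroupsInNetworkDef netDict)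

-- ===== LEMMAS AND PROOFS =====

-- A's guarded append collects exactly the successful 'Group' lookups, in order.
lemma extract_groups (clients : List (List (String × String))) :
    (clients.filter (fun c => (PySem.Dict.mk c).contains "Group")).map
        (fun c => (PySem.Dict.mk c).getD "Group" "") =
      clients.filterMap (fun c => (PySem.Dict.mk c).get? "Group") := by
  induction clients with
  | nil => rfl
  | cons c rest ih =>
    simp only [List.filter_cons, List.filterMap_cons]
    rw [PySem.Dict.contains_eq_isSome_get?]
    cases h : (PySem.Dict.mk c).get? "Group" with
    | none => simpa using ih
    | some g =>
      simp only [Option.isSome_some, if_true, List.map_cons,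
        PySem.Dict.getD_eq_get?_getD, h, Option.getD_some] at ih ⊢
      rw [ih]

lemma tfl_nil : pvTakeFilterLoop [] = [] := by
  rw [pvTakeFilterLoop]

lemma tfl_cons (g : String) (rest : List String) :
    pvTakeFilterLoop (g :: rest) = g :: pvTakeFilterLoop (rest.filter (fun x => x != g)) := by
  rw [pvTakeFilterLoop]

-- first-occurrence dedup via an accumulated seen-set equals take-first-and-filter
-- on the elements not yet seen.
lemma foldl_add_eq_takeFilter (xs : List String) (s : PySem.Set String) :
    List.foldl PySem.Set.add s xs =
      s ++ pvTakeFilterLoop (xs.filter (fun x => !(PySem.Set.contains s x))) := by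
  induction xs generalizing s with
  | nil => simp [tfl_nil]
  | cons a xs ih =>
    simp only [List.foldl_cons, List.filter_cons]
    by_cases h : a ∈ s
    · have hadd : PySem.Set.add s a = s := by simp [PySem.Set.add, PySem.Set.contains, h]
      rw [hadd, ih s]
      simp [PySem.Set.contains, h]
    · have hc : List.contains s a = false := by simpa using h
      have hadd : PySem.Set.add s a = s ++ [a] := by
        simp [PySem.Set.add, PySem.Set.contains, h]
      rw [hadd, ih (s ++ [a])]
      simp only [PySem.Set.contains, hc, Bool.not_false, if_pos, List.append_assoc,
        List.singleton_append, tfl_cons, List.filter_filter]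
      congr 3
      apply List.filter_congr
      intro x _
      by_cases hx : x = a <;> by_cases hs : x ∈ s <;>
        simp [hx, hs, bne]

lemma dedup_eq_takeFilter (xs : List String) :
    PySem.List.dedup xs = pvTakeFilterLoop xs := by
  rw [PySem.List.dedup_eq_ofList, PySem.Set.ofList_eq_foldl,
    foldl_add_eq_takeFilter xs []]
  simp [PySem.Set.contains]

-- ===== VERDICT =====
theorem findGroupsInNetworkDef_spec : Claim_equal_findGroupsInNetworkDef := by
  intro netDict _ _
  show findGroupsInNetworkDef netDict = findGroupsInNetworkDef_alt netDict
  simp only [findGroupsInNetworkDef, findGroupsInNetworkDef_alt]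
  rw [PySem.List.foldl_append_if, List.nil_append, extract_groups,
    dedup_eq_takeFilter]
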